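-- pv_equiv track=rewrite | github.com/daniel-reich/ubiquitous-fiesta | ecwE3tQK9Na8GJ9pN_22.py | little_big
-- ===== SOURCE A (Python) =====
-- def little_big(n):
--
--     l1 = [i for i in range(5,101)]
--     l2 = []
--     l3 = []
--     a = 50
--     b = 0
--
--     while b < 20:
--         a = a * 2
--         l2.append(a)
--         b = b + 1
--
--     for i,j in zip(l1,l2):
--         l3.append(i)
--         l3.append(j)
--
--     for i in l3:
--         if l3.index(i) == n-1:
--             return i
-- ===== SOURCE B (Python) =====
-- def little_big(n):
--     p = n - 1
--     if p < 0 or p > 39: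
--         return None
--     k = p // 2
--     if p % 2 == 0:
--         return 5 + k
--     return 100 * 2 ** k
-- ===== Notes on version B (the rewrite author's own statement) =====
-- stated objective: simpler
-- what changed: Replaces building the range list, the doubling loop, the zip-interleaved list and the linear .index scan by a closed-form arithmetic formula on the index (even offset p=n-1 gives 5+p//2, odd gives 100*2**(p//2), out of range gives None).
import Mathlib
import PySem

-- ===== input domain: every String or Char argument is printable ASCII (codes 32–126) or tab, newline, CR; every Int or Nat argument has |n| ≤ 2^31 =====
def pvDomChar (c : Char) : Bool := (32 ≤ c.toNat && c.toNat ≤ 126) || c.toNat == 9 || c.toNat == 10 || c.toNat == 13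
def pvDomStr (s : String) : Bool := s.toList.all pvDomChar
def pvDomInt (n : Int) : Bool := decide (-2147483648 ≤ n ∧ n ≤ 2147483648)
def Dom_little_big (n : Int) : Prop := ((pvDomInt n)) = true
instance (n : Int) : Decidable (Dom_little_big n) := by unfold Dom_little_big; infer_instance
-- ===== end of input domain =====

-- B replaces A's list building and linear .index scan by a closed-form arithmetic answer (objective: simpler).

-- ===== PORT A =====
-- l1 = [i for i in range(5,101)]
def pvL1 : List Int := PySem.List.pyRange 5 101 1
-- the while loop: state (a, l2), 20 iterations (b = 0..19)
def pvAL2 : Int × List Int :=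
  (PySem.List.pyRange 0 20 1).foldl (fun st _ => (st.1 * 2, st.2 ++ [st.1 * 2])) (50, [])
-- for i,j in zip(l1,l2): l3.append(i); l3.append(j)
def pvL3 : List Int := (pvL1.zip pvAL2.2).foldl (fun acc p => acc ++ [p.1, p.2]) []
-- for i in l3: if l3.index(i) == n-1: return i
-- (l3.index(i) never raises here since i ∈ l3, so the `.getD 0` default is never used; exact)
def pvFind (n : Int) : List Int → Option Int
  | [] => none
  | i :: rest =>
    if (((PySem.List.index? pvL3 i).getD 0 : Nat) : Int) = n - 1 then some i
    else pvFind n rest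

def little_big (n : Int) : Option Int := pvFind n pvL3

-- ===== PORT B =====
def little_big_alt (n : Int) : Option Int :=
  let p := n - 1
  if p < 0 ∨ 39 < p then none
  else
    let k := PySem.Int.floordiv p 2
    if PySem.Int.mod p 2 = 0 then some (5 + k)
    else some (100 * 2 ^ k.toNat)

-- ===== PRECONDITION & SPEC =====
def Spec_little_big (n : Int) (out : Option Int) : Prop := out = little_big_alt n
instance (n : Int) (out : Option Int) : Decidable (Spec_little_big n out) := by unfold Spec_little_big; infer_instance

-- ===== CLAIM (what is proved, stated in full; the proofs are below) =====
def Claim_equal_little_big : Prop := ∀ (n : Int), Dom_little_big n → Spec_little_big n (little_big n)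

-- ===== LEMMAS AND PROOFS =====
theorem pvL3_length : pvL3.length = 40 := by decide

theorem pvFind_none (n : Int) (h : n - 1 < 0 ∨ 40 ≤ n - 1) :
    ∀ rest, pvFind n rest = none := by
  intro rest
  induction rest with
  | nil => rfl
  | cons i rest ih =>
    have hcond : ¬ ((((PySem.List.index? pvL3 i).getD 0 : Nat) : Int) = n - 1) := by
      rcases hj : PySem.List.index? pvL3 i with _ | j
      · simp only [Option.getD_none]
        omega
      · obtain ⟨hk, -, -⟩ := PySem.List.getElem_of_index?_eq_some hj
        have hj40 : j < 40 := pvL3_length ▸ hk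
        simp only [Option.getD_some]
        omega
    simp only [pvFind]
    rw [if_neg hcond]
    exact ih

-- ===== VERDICT (by name: the statement is the Claim_ definition above) =====
theorem little_big_spec : Claim_equal_little_big := by
  intro n _
  unfold Spec_little_big
  by_cases h : 1 ≤ n ∧ n ≤ 40
  · obtain ⟨h1, h2⟩ := h
    interval_cases n <;> decide
  · rw [show little_big n = none from pvFind_none n (by omega) pvL3]
    simp only [little_big_alt]
    rw [if_pos (by omega)]
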